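-- pv_equiv track=rewrite | github.com/ayyekush/ML_Projects | Should-You-Buy-It/MODEL/PreprocessFns.py | emphasise_negation
-- ===== SOURCE A (Python) =====
-- def emphasise_negation(text):
--     negation_words=["not", 'no', 'barely',"doesn't",  'never',
--                     'neither', 'hardly',"isn't", "wasn't", "shouldn't",
--                     "wouldn't","couldn't", "won't", "can't", "don't"]
--
--     transformed_words=[]
--     negation_active=False
--
--     for word in text.split():
--         if word in negation_words:
--             negation_active=True
--             transformed_words.append(word)
--         elif negation_active and word in ['.', '!', '?', ',', ';', ':', 'but']:
--             negation_active=False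
--             transformed_words.append(word)
--         elif negation_active:
--             transformed_words.append(word+'_NEGATIVE')
--         else:
--             transformed_words.append(word)
--
--     return ' '.join(transformed_words)
-- ===== SOURCE B (Python) =====
-- NEGATION_WORDS = ["not", 'no', 'barely', "doesn't", 'never',
--                   'neither', 'hardly', "isn't", "wasn't", "shouldn't",
--                   "wouldn't", "couldn't", "won't", "can't", "don't"]
-- DELIMS = ['.', '!', '?', ',', ';', ':', 'but']
--
--
-- def _mark(word):
--     return word if word in NEGATION_WORDS else word + '_NEGATIVE'
--
--
-- def emphasise_negation(text):
--     tokens = text.split()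
--     out = []
--     i = 0
--     n = len(tokens)
--     while i < n:
--         # scan the segment up to (excluding) the next delimiter token
--         j = i
--         while j < n and tokens[j] not in DELIMS:
--             j += 1
--         seg = tokens[i:j]
--         # locate the first negation word in the segment
--         k = 0
--         while k < len(seg) and seg[k] not in NEGATION_WORDS:
--             k += 1
--         if k == len(seg):
--             out.extend(seg)                       # no negation: segment unchanged
--         else:
--             out.extend(seg[:k + 1])               # up to and including the negation word
--             out.extend(_mark(w) for w in seg[k + 1:])
--         if j < n:
--             out.append(tokens[j])                 # the delimiter token itself
--         i = j + 1
--     return ' '.join(out)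
-- ===== Notes on version B (the rewrite author's own statement) =====
-- stated objective: alternative
-- what changed: Replaces A's single pass with a threaded negation_active boolean by a two-level decomposition: split the token list into delimiter-separated segments, find the first negation word's index in each segment, and emit the tail of the segment via a mark function.
import Mathlib
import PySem

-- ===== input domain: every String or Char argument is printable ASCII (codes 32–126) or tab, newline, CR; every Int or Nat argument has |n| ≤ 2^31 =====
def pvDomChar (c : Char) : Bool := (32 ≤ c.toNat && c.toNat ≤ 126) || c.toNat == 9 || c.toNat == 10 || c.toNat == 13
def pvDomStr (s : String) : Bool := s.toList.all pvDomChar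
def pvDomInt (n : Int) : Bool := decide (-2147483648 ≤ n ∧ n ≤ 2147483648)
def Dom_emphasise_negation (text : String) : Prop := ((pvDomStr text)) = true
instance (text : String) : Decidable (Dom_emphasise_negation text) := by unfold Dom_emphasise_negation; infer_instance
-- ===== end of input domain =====

-- B changes the decomposition (segment split + first-negation index instead of a threaded flag); same result, same cost.

-- ===== PORT A =====
def pvNegWords : List String :=
  ["not", "no", "barely", "doesn't", "never",
   "neither", "hardly", "isn't", "wasn't", "shouldn't",
   "wouldn't", "couldn't", "won't", "can't", "don't"]

def pvDelims : List String := [".", "!", "?", ",", ";", ":", "but"]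

-- A's for-loop over the split words, threading (transformed_words, negation_active)
def pvStepA (st : List String × Bool) (word : String) : List String × Bool :=
  if pvNegWords.contains word then (st.1 ++ [word], true)
  else if st.2 && pvDelims.contains word then (st.1 ++ [word], false)
  else if st.2 then (st.1 ++ [word ++ "_NEGATIVE"], st.2)
  else (st.1 ++ [word], st.2)

def emphasise_negation (text : String) : String :=
  PySem.Str.join " " (((PySem.Str.split₀ text).foldl pvStepA ([], false)).1)

-- ===== PORT B =====
-- Source B's _mark
def pvMark (w : String) : String := if pvNegWords.contains w then w else w ++ "_NEGATIVE"

-- Source B's per-segment processing: find first negation word (inner while = take/dropWhile),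
-- emit up to and including it, then the rest marked
def pvProcSeg (seg : List String) : List String :=
  match seg.dropWhile (fun w => !pvNegWords.contains w) with
  | [] => seg
  | nw :: r2 => seg.takeWhile (fun w => !pvNegWords.contains w) ++ nw :: r2.map pvMark

-- Source B's outer while: peel one delimiter-separated segment at a time
def pvAltGo : List String → List String
  | [] => []
  | t :: ts =>
    let seg := (t :: ts).takeWhile (fun w => !pvDelims.contains w)
    match h : (t :: ts).dropWhile (fun w => !pvDelims.contains w) with
    | [] => pvProcSeg seg
    | d :: r => pvProcSeg seg ++ d :: pvAltGo r
  termination_by ts => ts.length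
  decreasing_by
    have hle := List.length_dropWhile_le (fun w => !pvDelims.contains w) (t :: ts)
    rw [h] at hle
    simp at hle ⊢
    omega

def emphasise_negation_alt (text : String) : String :=
  PySem.Str.join " " (pvAltGo (PySem.Str.split₀ text))

-- ===== PRECONDITION & SPEC =====
def Spec_emphasise_negation (text : String) (out : String) : Prop := out = emphasise_negation_alt text
instance (text : String) (out : String) : Decidable (Spec_emphasise_negation text out) := by unfold Spec_emphasise_negation; infer_instance

-- ===== CLAIM (what is proved, stated in full; the proofs are below) =====
def Claim_equal_emphasise_negation : Prop := ∀ (text : String), Dom_emphasise_negation text → Spec_emphasise_negation text (emphasise_negation text)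

-- ===== LEMMAS AND PROOFS =====

-- recursive characterisation of A's loop body
def pvAux : List String → Bool → List String
  | [], _ => []
  | w :: ws, active =>
    if pvNegWords.contains w then w :: pvAux ws true
    else if active && pvDelims.contains w then w :: pvAux ws false
    else if active then (w ++ "_NEGATIVE") :: pvAux ws active
    else w :: pvAux ws active

theorem pvFoldA (ts : List String) : ∀ (acc : List String) (active : Bool),
    (ts.foldl pvStepA (acc, active)).1 = acc ++ pvAux ts active := by
  induction ts with
  | nil => intro acc active; simp [pvAux]
  | cons w ws ih =>
    intro acc active
    simp only [List.foldl_cons, pvStepA, pvAux]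
    by_cases h1 : w ∈ pvNegWords <;>
      simp [h1] <;> cases active <;> by_cases h2 : w ∈ pvDelims <;>
      simp [h2, ih]

theorem pvDisjoint (w : String) (h : w ∈ pvNegWords) : w ∉ pvDelims := by
  fin_cases h <;> decide

-- a non-negation word at the head of a segment passes through pvProcSeg unchanged
theorem pvProcSeg_cons (w : String) (l : List String) (hn : w ∉ pvNegWords) :
    pvProcSeg (w :: l) = w :: pvProcSeg l := by
  unfold pvProcSeg
  simp only [List.contains_eq_mem, List.dropWhile_cons, List.takeWhile_cons, hn, decide_false,
    Bool.not_false, if_true]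
  cases h : l.dropWhile (fun x => !decide (x ∈ pvNegWords)) <;> simp

-- unfolding of pvAltGo in a uniform shape
theorem pvAltGo_eq (ts : List String) :
    pvAltGo ts = pvProcSeg (ts.takeWhile (fun w => !pvDelims.contains w)) ++
      (match ts.dropWhile (fun w => !pvDelims.contains w) with
       | [] => []
       | d :: r => d :: pvAltGo r) := by
  match ts with
  | [] => simp [pvAltGo, pvProcSeg]
  | t :: ts' =>
    rw [pvAltGo]
    cases h2 : (t :: ts').dropWhile (fun w => !pvDelims.contains w) <;> simp [h2]

-- the simultaneous invariant: A's flag-threading equals B's segment decomposition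
theorem pvMain (ts : List String) :
    pvAux ts false = pvAltGo ts ∧
    pvAux ts true = (ts.takeWhile (fun w => !pvDelims.contains w)).map pvMark ++
      (match ts.dropWhile (fun w => !pvDelims.contains w) with
       | [] => []
       | d :: r => d :: pvAltGo r) := by
  induction ts with
  | nil => constructor <;> simp [pvAux, pvAltGo]
  | cons w ws ih =>
    obtain ⟨ihF, ihT⟩ := ih
    by_cases hn : w ∈ pvNegWords
    · have hd := pvDisjoint w hn
      constructor
      · rw [pvAltGo_eq]
        simp [pvAux, List.contains_eq_mem, hn, hd, pvProcSeg, ihT]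
      · simp [pvAux, List.contains_eq_mem, hn, hd, pvMark, ihT]
    · by_cases hd : w ∈ pvDelims
      · constructor
        · rw [pvAltGo_eq]
          simp [pvAux, List.contains_eq_mem, hn, hd, pvProcSeg, ihF]
        · simp [pvAux, List.contains_eq_mem, hn, hd, ihF]
      · constructor
        · rw [pvAltGo_eq] at ihF
          rw [pvAltGo_eq]
          simp only [List.contains_eq_mem] at ihF
          simp [pvAux, List.contains_eq_mem, hn, hd, pvProcSeg_cons, ← ihF]
        · simp [pvAux, List.contains_eq_mem, hn, hd, pvMark, ihT]

-- ===== VERDICT (by name: the statement is the Claim_ definition above) =====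
theorem emphasise_negation_spec : Claim_equal_emphasise_negation := by
  intro text _
  unfold Spec_emphasise_negation emphasise_negation emphasise_negation_alt
  rw [pvFoldA, (pvMain _).1]
  simp
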